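-- pv_equiv track=rewrite | github.com/pmaia/ManelSim | scripts/mestrado/fs/clean_fs_utils.py | remove_duplicated_parent
-- ===== SOURCE A (Python) =====
-- def remove_duplicated_parent(path_with_duplicated_parent):#this is not supposed to be bulletproof but I think it works for most of the cases
-- 	if path_with_duplicated_parent.startswith("//"):
-- 		return path_with_duplicated_parent[1:]
-- 	else:
-- 		matches = []
--
-- 		s = 1
-- 		while s < len(path_with_duplicated_parent):
-- 			i = s
-- 			while i < len(path_with_duplicated_parent):
-- 				if path_with_duplicated_parent[i] == path_with_duplicated_parent[0]:
-- 					idx = i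
-- 					s = i
-- 					while idx < len(path_with_duplicated_parent) and \
-- 							path_with_duplicated_parent[idx] == path_with_duplicated_parent[idx - i]:
-- 						idx += 1
--
-- 					if (idx - 1 - i) <= i:
-- 						matches.append((i, idx - 1))
-- 						break
-- 				i += 1
-- 			s += 1
--
-- 		first_after_basepath = 0
-- 		max_interval = 0
-- 		for (start, end) in matches:
-- 			if end - start > max_interval:
-- 				max_interval = end - start
-- 				first_after_basepath = start
--
-- 		return path_with_duplicated_parent[first_after_basepath:]
-- ===== SOURCE B (Python) =====
-- def remove_duplicated_parent(path_with_duplicated_parent):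
--     # Z-algorithm: one O(n) pass computes all prefix-match lengths, then a single
--     # scan picks the first position maximizing the match interval.
--     p = path_with_duplicated_parent
--     if p.startswith("//"):
--         return p[1:]
--     n = len(p)
--     z = [0] * n
--     l = r = 0
--     for i in range(1, n):
--         k = min(r - i, z[i - l]) if i < r else 0
--         while i + k < n and p[k] == p[i + k]:
--             k += 1
--         z[i] = k
--         if i + k > r:
--             l, r = i, i + k
--     best_start = 0
--     best_interval = 0
--     for i in range(1, n):
--         if z[i] >= 1 and z[i] - 1 <= i and z[i] - 1 > best_interval:
--             best_interval = z[i] - 1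
--             best_start = i
--     return p[best_start:]
-- ===== Notes on version B (the rewrite author's own statement) =====
-- stated objective: faster
-- what changed: Replaces A's tangled triple-nested rescanning while-loops (worst-case quadratic prefix re-matching at every candidate position) by a single O(n) Z-algorithm pass computing all prefix-match lengths, followed by one linear selection scan.
import Mathlib
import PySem

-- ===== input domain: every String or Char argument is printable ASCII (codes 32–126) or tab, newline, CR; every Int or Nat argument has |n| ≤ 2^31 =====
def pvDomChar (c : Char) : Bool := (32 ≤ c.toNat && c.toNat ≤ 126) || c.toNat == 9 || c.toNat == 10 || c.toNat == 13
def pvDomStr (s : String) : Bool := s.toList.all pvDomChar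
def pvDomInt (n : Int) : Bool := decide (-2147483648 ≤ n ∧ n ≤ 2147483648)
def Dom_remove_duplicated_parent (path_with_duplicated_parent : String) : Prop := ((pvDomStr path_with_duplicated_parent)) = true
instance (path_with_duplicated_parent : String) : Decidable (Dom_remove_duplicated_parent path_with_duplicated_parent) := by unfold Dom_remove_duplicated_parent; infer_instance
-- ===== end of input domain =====

-- B replaces A's quadratic rescanning nested while-loops by one Z-algorithm pass plus a
-- linear selection scan; proved to return the same string on every input (A is total).
-- Every loop is ported with a `fuel` counter that only makes the recursion structural
-- (fuel never runs out on the ports' own calls; this is a totality guard, not a branch).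

-- ===== PORT A =====
-- A's innermost while: extend idx while path[idx] == path[idx - i].
-- (idx stays ≥ i on every call from pvInnerA, so Nat subtraction `idx - i` is Python's int subtraction.)
def pvExtA (c : List Char) (i : Nat) : Nat → Nat → Nat
  | 0, idx => idx
  | fuel + 1, idx =>
    if idx < c.length ∧ c.getD idx ' ' = c.getD (idx - i) ' ' then pvExtA c i fuel (idx + 1)
    else idx

-- A's middle while over i, carrying s and matches; returns (s, matches) at break or loop end.
-- (the break path appends (i, idx-1); idx ≥ i+1 there, so the Nat subtractions match Python's.)
def pvInnerA (c : List Char) : Nat → Nat → Nat → List (Nat × Nat) → Nat × List (Nat × Nat)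
  | 0, _, s, m => (s, m)
  | fuel + 1, i, s, m =>
    if i < c.length then
      if c.getD i ' ' = c.getD 0 ' ' then
        let idx := pvExtA c i c.length i
        if idx - 1 - i ≤ i then (i, m ++ [(i, idx - 1)])
        else pvInnerA c fuel (i + 1) i m
      else pvInnerA c fuel (i + 1) s m
    else (s, m)

-- A's outer while over s
def pvOuterA (c : List Char) : Nat → Nat → List (Nat × Nat) → List (Nat × Nat)
  | 0, _, m => m
  | fuel + 1, s, m =>
    if s < c.length then
      let r := pvInnerA c c.length s s m
      pvOuterA c fuel (r.1 + 1) r.2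
    else m

-- A's final for-loop over matches, carrying (first_after_basepath, max_interval)
-- (end ≥ start for every recorded match, so Nat `e - s` is Python's end - start.)
def pvSelA (m : List (Nat × Nat)) (st : Nat × Nat) : Nat × Nat :=
  match m with
  | [] => st
  | (s, e) :: rest => if st.2 < e - s then pvSelA rest (s, e - s) else pvSelA rest st

def remove_duplicated_parent (path_with_duplicated_parent : String) : String :=
  if PySem.Str.startswith path_with_duplicated_parent "//" then
    PySem.Str.slice path_with_duplicated_parent (some 1) none
  else
    let c := path_with_duplicated_parent.toList
    let ms := pvOuterA c c.length 1 []
    let sel := pvSelA ms (0, 0)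
    PySem.Str.slice path_with_duplicated_parent (some (sel.1 : Int)) none

-- ===== PORT B =====
-- B's inner while of the Z-algorithm: extend k while p[k] == p[i + k]
def pvExtB (c : List Char) (i : Nat) : Nat → Nat → Nat
  | 0, k => k
  | fuel + 1, k =>
    if i + k < c.length ∧ c.getD k ' ' = c.getD (i + k) ' ' then pvExtB c i fuel (k + 1)
    else k

-- B's main Z-algorithm loop over i, carrying the z list and the box (l, r)
def pvZLoop (c : List Char) : Nat → Nat → List Nat → Nat → Nat → List Nat
  | 0, _, z, _, _ => z
  | fuel + 1, i, z, l, r =>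
    if i < c.length then
      let k0 := if i < r then min (r - i) (z.getD (i - l) 0) else 0
      let k := pvExtB c i c.length k0
      let z' := z.set i k
      if r < i + k then pvZLoop c fuel (i + 1) z' i (i + k)
      else pvZLoop c fuel (i + 1) z' l r
    else z

-- B's selection loop over i = 1 .. n-1, carrying (best_start, best_interval)
def pvSelB (c : List Char) (z : List Nat) : Nat → Nat → Nat × Nat → Nat × Nat
  | 0, _, st => st
  | fuel + 1, i, st =>
    if i < c.length then
      let zi := z.getD i 0
      if 1 ≤ zi ∧ zi - 1 ≤ i ∧ st.2 < zi - 1 then pvSelB c z fuel (i + 1) (i, zi - 1)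
      else pvSelB c z fuel (i + 1) st
    else st

def remove_duplicated_parent_alt (path_with_duplicated_parent : String) : String :=
  if PySem.Str.startswith path_with_duplicated_parent "//" then
    PySem.Str.slice path_with_duplicated_parent (some 1) none
  else
    let c := path_with_duplicated_parent.toList
    let z := pvZLoop c c.length 1 (List.replicate c.length 0) 0 0
    let sel := pvSelB c z c.length 1 (0, 0)
    PySem.Str.slice path_with_duplicated_parent (some (sel.1 : Int)) none

-- ===== PRECONDITION & SPEC =====
def Spec_remove_duplicated_parent (path_with_duplicated_parent : String) (out : String) : Prop := out = remove_duplicated_parent_alt path_with_duplicated_parent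
instance (path_with_duplicated_parent : String) (out : String) : Decidable (Spec_remove_duplicated_parent path_with_duplicated_parent out) := by unfold Spec_remove_duplicated_parent; infer_instance

-- ===== CLAIM (what is proved, stated in full; the proofs are below) =====
def Claim_equal_remove_duplicated_parent : Prop := ∀ (path_with_duplicated_parent : String), Dom_remove_duplicated_parent path_with_duplicated_parent → Spec_remove_duplicated_parent path_with_duplicated_parent (remove_duplicated_parent path_with_duplicated_parent)

-- ===== LEMMAS AND PROOFS =====

-- longest common prefix length of two lists
def lcpLen : List Char → List Char → Nat
  | a :: as, b :: bs => if a = b then lcpLen as bs + 1 else 0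
  | _, _ => 0

-- Z-value: length of the longest common prefix of c and c.drop i
def pvZ (c : List Char) (i : Nat) : Nat := lcpLen c (c.drop i)

theorem lcpLen_le_right : ∀ a b : List Char, lcpLen a b ≤ b.length := by
  intro a; induction a with
  | nil => intro b; cases b <;> simp [lcpLen]
  | cons x xs ih => intro b; cases b with
    | nil => simp [lcpLen]
    | cons y ys => simp only [lcpLen]; split <;> simp; exact ih ys

theorem lcpLen_agree : ∀ (a b : List Char) (j : Nat), j < lcpLen a b →
    a.getD j ' ' = b.getD j ' ' := by
  intro a
  induction a with
  | nil => intro b j h; cases b <;> simp [lcpLen] at h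
  | cons x xs ih =>
    intro b j h
    cases b with
    | nil => simp [lcpLen] at h
    | cons y ys =>
      simp only [lcpLen] at h
      split at h
      · cases j with
        | zero => simpa using ‹x = y›
        | succ j' => simpa using ih ys j' (by omega)
      · omega

theorem lcpLen_stop : ∀ (a b : List Char), lcpLen a b < a.length → lcpLen a b < b.length →
    a.getD (lcpLen a b) ' ' ≠ b.getD (lcpLen a b) ' ' := by
  intro a
  induction a with
  | nil => intro b h; simp at h
  | cons x xs ih =>
    intro b h1 h2
    cases b with
    | nil => simp at h2
    | cons y ys =>
      simp only [lcpLen] at h1 h2 ⊢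
      by_cases hxy : x = y
      · rw [if_pos hxy] at h1 h2 ⊢
        simpa using ih ys (by simpa using h1) (by simpa using h2)
      · rw [if_neg hxy] at h1 h2 ⊢
        simpa using hxy

theorem lcpLen_ge : ∀ (a b : List Char) (m : Nat), (∀ j, j < m → a.getD j ' ' = b.getD j ' ') →
    m ≤ a.length → m ≤ b.length → m ≤ lcpLen a b := by
  intro a
  induction a with
  | nil => intro b m _ h _; simp at h; omega
  | cons x xs ih =>
    intro b m hag h1 h2
    cases b with
    | nil => simp at h2; omega
    | cons y ys =>
      cases m with
      | zero => omega
      | succ m' =>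
        have hxy : x = y := by simpa using hag 0 (by omega)
        simp only [lcpLen, if_pos hxy]
        have := ih ys m' (fun j hj => by simpa using hag (j + 1) (by omega)) (by simpa using h1) (by simpa using h2)
        omega

theorem getD_drop (c : List Char) (i j : Nat) : (c.drop i).getD j ' ' = c.getD (i + j) ' ' := by
  simp [List.getD_eq_getElem?_getD, List.getElem?_drop]

theorem drop_length' (c : List Char) (i : Nat) : (c.drop i).length = c.length - i := by simp

-- basic bounds on pvZ
theorem pvZ_le (c : List Char) (i : Nat) : pvZ c i ≤ c.length - i := by
  have := lcpLen_le_right c (c.drop i); simpa [pvZ] using this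

theorem pvZ_agree (c : List Char) (i j : Nat) (h : j < pvZ c i) :
    c.getD j ' ' = c.getD (i + j) ' ' := by
  have := lcpLen_agree c (c.drop i) j h
  rwa [getD_drop] at this

theorem pvZ_pos (c : List Char) (i : Nat) (hi : i < c.length)
    (h : c.getD i ' ' = c.getD 0 ' ') : 1 ≤ pvZ c i := by
  apply lcpLen_ge
  · intro j hj; interval_cases j; rw [getD_drop]; simpa using h.symm
  · omega
  · simp; omega

theorem pvZ_zero_of_ne (c : List Char) (i : Nat) (_hi : i < c.length)
    (h : ¬ c.getD i ' ' = c.getD 0 ' ') : pvZ c i = 0 := by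
  by_contra hz
  have h0 := pvZ_agree c i 0 (by omega)
  rw [Nat.add_zero] at h0
  exact h h0.symm

-- the extension loops both compute pvZ (given enough fuel)
theorem pvExtB_eq (c : List Char) (i : Nat) :
    ∀ f k, pvZ c i - k ≤ f → k ≤ pvZ c i → pvExtB c i f k = pvZ c i := by
  have hle := pvZ_le c i
  have hZ : pvZ c i = lcpLen c (c.drop i) := rfl
  have stop : ∀ f, pvExtB c i f (pvZ c i) = pvZ c i := by
    intro f
    cases f with
    | zero => rfl
    | succ f =>
      rw [pvExtB, if_neg]
      rintro ⟨h1, h2⟩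
      have hs := lcpLen_stop c (c.drop i) (by omega) (by rw [drop_length']; omega)
      rw [getD_drop, ← hZ] at hs
      exact hs (show c.getD (pvZ c i) ' ' = c.getD (i + pvZ c i) ' ' from h2)
  intro f
  induction f with
  | zero =>
    intro k h1 h2
    have hk : k = pvZ c i := by omega
    rw [hk]; exact stop 0
  | succ f ih =>
    intro k h1 h2
    by_cases hk : k = pvZ c i
    · rw [hk]; exact stop (f + 1)
    · rw [pvExtB, if_pos ⟨by omega, pvZ_agree c i k (by omega)⟩]
      exact ih (k + 1) (by omega) (by omega)

theorem pvExtA_eq (c : List Char) (i : Nat) :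
    ∀ f k, pvZ c i - k ≤ f → k ≤ pvZ c i → pvExtA c i f (i + k) = i + pvZ c i := by
  have hle := pvZ_le c i
  have hZ : pvZ c i = lcpLen c (c.drop i) := rfl
  have stop : ∀ f, pvExtA c i f (i + pvZ c i) = i + pvZ c i := by
    intro f
    cases f with
    | zero => rfl
    | succ f =>
      rw [pvExtA, if_neg]
      rintro ⟨h1, h2⟩
      have hs := lcpLen_stop c (c.drop i) (by omega) (by rw [drop_length']; omega)
      rw [getD_drop, ← hZ] at hs
      rw [show i + pvZ c i - i = pvZ c i by omega] at h2
      exact hs h2.symm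
  intro f
  induction f with
  | zero =>
    intro k h1 h2
    have hk : k = pvZ c i := by omega
    rw [hk]; exact stop 0
  | succ f ih =>
    intro k h1 h2
    by_cases hk : k = pvZ c i
    · rw [hk]; exact stop (f + 1)
    · rw [pvExtA, if_pos ⟨by omega, by
        rw [show i + k - i = k by omega]
        exact (pvZ_agree c i k (by omega)).symm⟩]
      rw [show i + k + 1 = i + (k + 1) by omega]
      exact ih (k + 1) (by omega) (by omega)

-- reference scan: the list of matches A accumulates, characterized via pvZ
def pvScan (c : List Char) (i : Nat) (m : List (Nat × Nat)) : List (Nat × Nat) :=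
  if i < c.length then
    if c.getD i ' ' = c.getD 0 ' ' then
      if pvZ c i - 1 ≤ i then pvScan c (i + 1) (m ++ [(i, i + pvZ c i - 1)])
      else pvScan c (i + 1) m
    else pvScan c (i + 1) m
  else m
termination_by c.length - i
decreasing_by all_goals omega

-- if no position in [i, len) matches c[0], the middle loop falls through unchanged
theorem pvInnerA_nomatch (c : List Char) : ∀ f i s m,
    (∀ j, i ≤ j → j < c.length → ¬ c.getD j ' ' = c.getD 0 ' ') →
    pvInnerA c f i s m = (s, m) := by
  intro f
  induction f with
  | zero => intro i s m _; rfl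
  | succ f ih =>
    intro i s m hno
    by_cases hi : i < c.length
    · rw [pvInnerA, if_pos hi, if_neg (hno i (le_refl i) hi)]
      exact ih (i + 1) s m (fun j h1 h2 => hno j (by omega) h2)
    · rw [pvInnerA, if_neg hi]

-- ... and the outer loop terminates without adding matches
theorem pvOuterA_nomatch (c : List Char) : ∀ f t m,
    (∀ j, t ≤ j → j < c.length → ¬ c.getD j ' ' = c.getD 0 ' ') →
    pvOuterA c f t m = m := by
  intro f
  induction f with
  | zero => intro t m _; rfl
  | succ f ih =>
    intro t m hno
    by_cases ht : t < c.length
    · rw [pvOuterA, if_pos ht]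
      simp only [pvInnerA_nomatch c c.length t t m hno]
      exact ih (t + 1) m (fun j h1 h2 => hno j (by omega) h2)
    · rw [pvOuterA, if_neg ht]

theorem pvOuterA_stop (c : List Char) (f s : Nat) (m : List (Nat × Nat))
    (h : ¬ s < c.length) : pvOuterA c f s m = m := by
  cases f with
  | zero => rfl
  | succ f => rw [pvOuterA, if_neg h]

-- untangling A's nested loops into the single reference scan
theorem pvMainA (c : List Char) : ∀ d i s m f g, c.length - i ≤ d → c.length - i ≤ g →
    c.length - i ≤ f → s ≤ i →
    (∀ j, s < j → j < i → ¬ c.getD j ' ' = c.getD 0 ' ') →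
    pvOuterA c f ((pvInnerA c g i s m).1 + 1) (pvInnerA c g i s m).2 = pvScan c i m := by
  intro d
  induction d with
  | zero =>
    intro i s m f g h hg hf hs hno
    rw [pvInnerA_nomatch c g i s m (fun j h1 h2 => by omega), pvScan, if_neg (by omega)]
    exact pvOuterA_nomatch c f (s + 1) m (fun j h1 h2 => hno j (by omega) (by omega))
  | succ d ih =>
    intro i s m f g h hg hf hs hno
    by_cases hi : i < c.length
    · obtain ⟨g', rfl⟩ : ∃ g', g = g' + 1 := ⟨g - 1, by omega⟩
      by_cases h1 : c.getD i ' ' = c.getD 0 ' '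
      · have hpos : 1 ≤ pvZ c i := pvZ_pos c i hi h1
        have hext : pvExtA c i c.length i = i + pvZ c i := by
          have hb := pvZ_le c i
          have := pvExtA_eq c i c.length 0 (by omega) (by omega)
          simpa using this
        by_cases hb : pvZ c i - 1 ≤ i
        · rw [pvInnerA, if_pos hi, if_pos h1]
          simp only [hext]
          rw [if_pos (show i + pvZ c i - 1 - i ≤ i by omega)]
          rw [pvScan, if_pos hi, if_pos h1, if_pos hb]
          obtain ⟨f', rfl⟩ : ∃ f', f = f' + 1 := ⟨f - 1, by omega⟩
          by_cases hi1 : i + 1 < c.length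
          · rw [pvOuterA, if_pos hi1]
            exact ih (i + 1) (i + 1) (m ++ [(i, i + pvZ c i - 1)]) f' c.length
              (by omega) (by omega) (by omega) (le_refl _) (by omega)
          · rw [pvOuterA, if_neg hi1, pvScan, if_neg hi1]
        · rw [pvInnerA, if_pos hi, if_pos h1]
          simp only [hext]
          rw [if_neg (show ¬ i + pvZ c i - 1 - i ≤ i by omega)]
          rw [pvScan, if_pos hi, if_pos h1, if_neg hb]
          exact ih (i + 1) i m f g' (by omega) (by omega) (by omega) (by omega) (by omega)
      · rw [pvInnerA, if_pos hi, if_neg h1, pvScan, if_pos hi, if_neg h1]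
        refine ih (i + 1) s m f g' (by omega) (by omega) (by omega) (by omega) ?_
        intro j hj1 hj2
        by_cases hji : j = i
        · rw [hji]; exact h1
        · exact hno j hj1 (by omega)
    · rw [pvInnerA_nomatch c (g) i s m (fun j h1 h2 => by omega), pvScan, if_neg hi]
      exact pvOuterA_nomatch c f (s + 1) m (fun j h1 h2 => hno j (by omega) (by omega))

theorem pvOuterA_eq_scan (c : List Char) : pvOuterA c c.length 1 [] = pvScan c 1 [] := by
  by_cases h1 : 1 < c.length
  · obtain ⟨f, hf⟩ : ∃ f, c.length = f + 1 := ⟨c.length - 1, by omega⟩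
    conv_lhs => rw [hf]
    rw [pvOuterA, if_pos h1]
    exact pvMainA c c.length 1 1 [] f c.length (by omega) (by omega) (by omega)
      (le_refl 1) (by omega)
  · rw [pvOuterA_stop c _ 1 [] h1, pvScan, if_neg h1]

-- the computed z list is pointwise pvZ
theorem pvZLoop_spec (c : List Char) : ∀ d f i z l r, c.length - i ≤ d → c.length - i ≤ f →
    1 ≤ i → z.length = c.length →
    (∀ j, 1 ≤ j → j < i → z.getD j 0 = pvZ c j) →
    ((l = 0 ∧ r = 0) ∨ (1 ≤ l ∧ l < i ∧ r = l + pvZ c l)) →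
    (pvZLoop c f i z l r).length = c.length ∧
      ∀ j, 1 ≤ j → j < c.length → (pvZLoop c f i z l r).getD j 0 = pvZ c j := by
  intro d
  induction d with
  | zero =>
    intro f i z l r h hf h1 hlen hz _
    have hstop : pvZLoop c f i z l r = z := by
      cases f with
      | zero => rfl
      | succ f => rw [pvZLoop, if_neg (by omega)]
    rw [hstop]
    exact ⟨hlen, fun j hj1 hj2 => hz j hj1 (by omega)⟩
  | succ d ih =>
    intro f i z l r h hf h1 hlen hz hbox
    by_cases hi : i < c.length
    · obtain ⟨f', rfl⟩ : ∃ f', f = f' + 1 := ⟨f - 1, by omega⟩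
      have hk0 : (if i < r then min (r - i) (z.getD (i - l) 0) else 0) ≤ pvZ c i := by
        split
        · rename_i hir
          rcases hbox with ⟨hl0, hr0⟩ | ⟨hl1, hli, hr⟩
          · omega
          · have hzl := pvZ_le c l
            rw [hz (i - l) (by omega) (by omega)]
            have hzi := pvZ_le c (i - l)
            refine lcpLen_ge c (c.drop i) _ ?_ ?_ ?_
            · intro j hj
              rw [getD_drop]
              have e1 := pvZ_agree c (i - l) j (by omega)
              have e2 := pvZ_agree c l ((i - l) + j) (by omega)
              rw [e1, e2, show l + ((i - l) + j) = i + j by omega]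
            · omega
            · rw [drop_length']; omega
        · omega
      have hzb := pvZ_le c i
      have hk := pvExtB_eq c i c.length _ (by omega) hk0
      rw [pvZLoop, if_pos hi]
      simp only [hk]
      have hlen' : (z.set i (pvZ c i)).length = c.length := by simp [hlen]
      have hz' : ∀ j, 1 ≤ j → j < i + 1 → (z.set i (pvZ c i)).getD j 0 = pvZ c j := by
        intro j hj1 hj2
        by_cases hji : j = i
        · subst hji
          simp [List.getD_eq_getElem?_getD, hlen, hi]
        · rw [List.getD_eq_getElem?_getD, List.getElem?_set_ne (by omega),
            ← List.getD_eq_getElem?_getD]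
          exact hz j hj1 (by omega)
      split
      · exact ih f' (i + 1) _ i (i + pvZ c i) (by omega) (by omega) (by omega) hlen' hz'
          (Or.inr ⟨by omega, by omega, rfl⟩)
      · refine ih f' (i + 1) _ l r (by omega) (by omega) (by omega) hlen' hz' ?_
        rcases hbox with ⟨a, b⟩ | ⟨a, b, cc⟩
        · exact Or.inl ⟨a, b⟩
        · exact Or.inr ⟨a, by omega, cc⟩
    · have hstop : pvZLoop c f i z l r = z := by
        cases f with
        | zero => rfl
        | succ f => rw [pvZLoop, if_neg hi]
      rw [hstop]
      exact ⟨hlen, fun j hj1 hj2 => hz j hj1 (by omega)⟩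

-- reference selection loop over pvZ
def pvBRef (c : List Char) (i : Nat) (st : Nat × Nat) : Nat × Nat :=
  if i < c.length then
    if 1 ≤ pvZ c i ∧ pvZ c i - 1 ≤ i ∧ st.2 < pvZ c i - 1 then pvBRef c (i + 1) (i, pvZ c i - 1)
    else pvBRef c (i + 1) st
  else st
termination_by c.length - i
decreasing_by all_goals omega

theorem pvScan_append (c : List Char) : ∀ d i m, c.length - i ≤ d →
    pvScan c i m = m ++ pvScan c i [] := by
  intro d
  induction d with
  | zero =>
    intro i m h
    rw [pvScan, if_neg (show ¬ i < c.length by omega)]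
    conv_rhs => rw [pvScan, if_neg (show ¬ i < c.length by omega)]
    simp
  | succ d ih =>
    intro i m h
    by_cases hi : i < c.length
    · by_cases h1 : c.getD i ' ' = c.getD 0 ' '
      · by_cases h2 : pvZ c i - 1 ≤ i
        · rw [pvScan, if_pos hi, if_pos h1, if_pos h2,
            ih (i + 1) (m ++ [(i, i + pvZ c i - 1)]) (by omega)]
          conv_rhs => rw [pvScan, if_pos hi, if_pos h1, if_pos h2]
          rw [ih (i + 1) ([] ++ [(i, i + pvZ c i - 1)]) (by omega)]
          simp
        · rw [pvScan, if_pos hi, if_pos h1, if_neg h2, ih (i + 1) m (by omega)]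
          conv_rhs => rw [pvScan, if_pos hi, if_pos h1, if_neg h2]
      · rw [pvScan, if_pos hi, if_neg h1, ih (i + 1) m (by omega)]
        conv_rhs => rw [pvScan, if_pos hi, if_neg h1]
    · rw [pvScan, if_neg hi]
      conv_rhs => rw [pvScan, if_neg hi]
      simp

theorem pvSelA_append (m m' : List (Nat × Nat)) (st : Nat × Nat) :
    pvSelA (m ++ m') st = pvSelA m' (pvSelA m st) := by
  induction m generalizing st with
  | nil => rfl
  | cons p rest ih => obtain ⟨s, e⟩ := p; simp only [pvSelA, List.cons_append]; split <;> exact ih _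

theorem pvSel_fuse (c : List Char) : ∀ d i st, c.length - i ≤ d →
    pvSelA (pvScan c i []) st = pvBRef c i st := by
  intro d
  induction d with
  | zero =>
    intro i st h
    rw [pvScan, if_neg (by omega), pvBRef, if_neg (by omega)]
    rfl
  | succ d ih =>
    intro i st h
    by_cases hi : i < c.length
    · rw [pvScan, if_pos hi, pvBRef, if_pos hi]
      by_cases h1 : c.getD i ' ' = c.getD 0 ' '
      · have hpos : 1 ≤ pvZ c i := pvZ_pos c i hi h1
        rw [if_pos h1]
        by_cases h2 : pvZ c i - 1 ≤ i
        · rw [if_pos h2, pvScan_append c d (i + 1) _ (by omega)]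
          simp only [List.nil_append]
          rw [pvSelA_append]
          have harith : i + pvZ c i - 1 - i = pvZ c i - 1 := by omega
          by_cases h3 : st.2 < pvZ c i - 1
          · rw [if_pos ⟨hpos, h2, h3⟩]
            simp only [pvSelA, harith, if_pos h3]
            exact ih (i + 1) _ (by omega)
          · rw [if_neg (by tauto)]
            simp only [pvSelA, harith, if_neg h3]
            exact ih (i + 1) st (by omega)
        · rw [if_neg h2, if_neg (by tauto)]
          exact ih (i + 1) st (by omega)
      · have hz0 : pvZ c i = 0 := pvZ_zero_of_ne c i hi h1
        rw [if_neg h1, if_neg (by rw [hz0]; simp)]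
        exact ih (i + 1) st (by omega)
    · rw [pvScan, if_neg hi, pvBRef, if_neg hi]; rfl

theorem pvSelB_eq_ref (c : List Char) (z : List Nat)
    (hz : ∀ j, 1 ≤ j → j < c.length → z.getD j 0 = pvZ c j) :
    ∀ d f i st, c.length - i ≤ d → c.length - i ≤ f → 1 ≤ i →
    pvSelB c z f i st = pvBRef c i st := by
  intro d
  induction d with
  | zero =>
    intro f i st h hf h1
    have hstop : pvSelB c z f i st = st := by
      cases f with
      | zero => rfl
      | succ f => rw [pvSelB, if_neg (by omega)]
    rw [hstop, pvBRef, if_neg (by omega)]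
  | succ d ih =>
    intro f i st h hf h1
    by_cases hi : i < c.length
    · obtain ⟨f', rfl⟩ : ∃ f', f = f' + 1 := ⟨f - 1, by omega⟩
      rw [pvSelB, if_pos hi, pvBRef, if_pos hi]
      simp only [hz i h1 hi]
      split <;> exact ih f' (i + 1) _ (by omega) (by omega) (by omega)
    · have hstop : pvSelB c z f i st = st := by
        cases f with
        | zero => rfl
        | succ f => rw [pvSelB, if_neg hi]
      rw [hstop, pvBRef, if_neg hi]

-- ===== VERDICT (by name: the statement is the Claim_ definition above) =====
theorem remove_duplicated_parent_spec : Claim_equal_remove_duplicated_parent := by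
  intro p _
  unfold Spec_remove_duplicated_parent remove_duplicated_parent remove_duplicated_parent_alt
  split
  · rfl
  · have hz := pvZLoop_spec p.toList p.toList.length p.toList.length 1
      (List.replicate p.toList.length 0) 0 0 (by omega) (by omega) (by omega)
      (by simp) (by omega) (Or.inl ⟨rfl, rfl⟩)
    have hsel : pvSelB p.toList
        (pvZLoop p.toList p.toList.length 1 (List.replicate p.toList.length 0) 0 0)
        p.toList.length 1 (0, 0) = pvBRef p.toList 1 (0, 0) :=
      pvSelB_eq_ref _ _ hz.2 p.toList.length p.toList.length 1 (0, 0) (by omega) (by omega) (by omega)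
    have ha : pvSelA (pvOuterA p.toList p.toList.length 1 []) (0, 0) = pvBRef p.toList 1 (0, 0) := by
      rw [pvOuterA_eq_scan, pvSel_fuse p.toList p.toList.length 1 (0, 0) (by omega)]
    simp only [ha, hsel]
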